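-- pv_equiv track=rewrite | github.com/ihuseynov/LT_Project | utils.py | iob_to_iobes
-- ===== SOURCE A (Python) =====
-- def iob_to_iobes(tags: list):
--     """
--     IOB to IOBES format.
--         """
--     new_tags = []
--     for i, tag in enumerate(tags):
--         if tag == "O":
--             new_tags.append(tag)
--         elif tag.split("-")[0] == "B":
--             if i + 1 != len(tags) and tags[i + 1].split("-")[0] == "I":
--                 new_tags.append(tag)
--             else:
--                 new_tags.append(tag.replace("B-", "S-"))
--         elif tag.split("-")[0] == "I":
--             if i + 1 < len(tags) and tags[i + 1].split("-")[0] == "I":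
--                 new_tags.append(tag)
--             else:
--                 new_tags.append(tag.replace("I-", "E-"))
--         else:
--             raise Exception("Invalid IOB format!")
--     return new_tags
-- ===== SOURCE B (Python) =====
-- def iob_to_iobes(tags: list):
--     """
--     IOB to IOBES format: single reverse pass keeping a 'continues' flag
--     ('the following tag starts with I'), instead of a lookahead per element.
--     """
--     out = []
--     continues = False
--     for tag in reversed(tags):
--         if tag == "O":
--             out.append(tag)
--         elif tag.split("-")[0] == "B":
--             out.append(tag if continues else tag.replace("B-", "S-"))
--         elif tag.split("-")[0] == "I":
--             out.append(tag if continues else tag.replace("I-", "E-"))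
--         else:
--             raise Exception("Invalid IOB format!")
--         continues = tag.split("-")[0] == "I"
--     out.reverse()
--     return out
-- ===== Notes on version B (the rewrite author's own statement) =====
-- stated objective: alternative
-- what changed: Replaces the forward loop with an indexed lookahead tags[i+1] by a single reverse traversal carrying a boolean 'continues' flag, so no indexing into the list is needed.
import Mathlib
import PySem

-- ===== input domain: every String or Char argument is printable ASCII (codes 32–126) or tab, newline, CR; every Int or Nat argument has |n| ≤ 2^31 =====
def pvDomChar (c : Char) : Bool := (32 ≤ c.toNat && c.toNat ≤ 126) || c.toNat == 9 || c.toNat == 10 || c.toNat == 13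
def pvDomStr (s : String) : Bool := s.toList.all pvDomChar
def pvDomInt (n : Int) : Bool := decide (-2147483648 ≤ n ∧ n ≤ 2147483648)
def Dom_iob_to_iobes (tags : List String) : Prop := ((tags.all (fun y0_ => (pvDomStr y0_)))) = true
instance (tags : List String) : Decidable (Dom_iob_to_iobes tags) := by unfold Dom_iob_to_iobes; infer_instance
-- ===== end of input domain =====

-- B converts IOB to IOBES by a single reverse traversal carrying a 'continues' flag
-- instead of A's forward loop with an indexed lookahead tags[i+1] (alternative decomposition, same cost).


-- ===== PORT A =====
-- tag.split("-")[0]  (str.split with a nonempty separator never returns an empty list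
-- and never raises for sep "-", so split? is some and the Python index [0] cannot raise;
-- getD/headD are exact here)
def pvHead (t : String) : String := ((PySem.Str.split? t "-").getD []).headD ""

-- the body of A's for-loop (one enumerate step); the raise branch leaves the
-- accumulator unchanged — those inputs are excluded by Pre_iob_to_iobes
def aStep (tags : List String) (new_tags : List String) (p : Int × String) : List String :=
  let i := p.1
  let tag := p.2
  if tag = "O" then new_tags ++ [tag]
  else if pvHead tag = "B" then
    -- Python short-circuits before tags[i+1]; pyGet? returns none exactly there,
    -- and pvHead "" ≠ "I", so the unguarded read is value-equal
    if i + 1 ≠ (tags.length : Int) ∧ pvHead ((PySem.List.pyGet? tags (i + 1)).getD "") = "I"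
    then new_tags ++ [tag]
    else new_tags ++ [PySem.Str.replace tag "B-" "S-"]
  else if pvHead tag = "I" then
    if i + 1 < (tags.length : Int) ∧ pvHead ((PySem.List.pyGet? tags (i + 1)).getD "") = "I"
    then new_tags ++ [tag]
    else new_tags ++ [PySem.Str.replace tag "I-" "E-"]
  else new_tags  -- raise Exception("Invalid IOB format!")

def iob_to_iobes (tags : List String) : List String :=
  (PySem.List.enumerate tags 0).foldl (aStep tags) []

-- ===== PORT B =====
-- the conditional expression appended inside Source B's loop, given the 'continues' flag
-- ('the following tag starts with I'); raise branch yields tag unchanged (excluded by Pre_)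
def bEmit (continues : Bool) (tag : String) : String :=
  if tag = "O" then tag
  else if pvHead tag = "B" then (if continues then tag else PySem.Str.replace tag "B-" "S-")
  else if pvHead tag = "I" then (if continues then tag else PySem.Str.replace tag "I-" "E-")
  else tag  -- raise Exception("Invalid IOB format!")

-- Source B's loop over reversed(tags): emit one tag per step, then thread
-- continues := (tag.split("-")[0] == "I")
def altGo (continues : Bool) : List String → List String
  | [] => []
  | tag :: rest => bEmit continues tag :: altGo (pvHead tag == "I") rest

def iob_to_iobes_alt (tags : List String) : List String :=
  (altGo false tags.reverse).reverse

-- ===== PRECONDITION & SPEC =====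
-- Pre_ excludes exactly the inputs on which both Pythons raise Exception("Invalid IOB format!"):
-- some tag is neither "O" nor has first '-'-component "B" or "I".
def Pre_iob_to_iobes (tags : List String) : Prop :=
  ∀ t ∈ tags, t = "O" ∨ pvHead t = "B" ∨ pvHead t = "I"
instance (tags : List String) : Decidable (Pre_iob_to_iobes tags) := by unfold Pre_iob_to_iobes; infer_instance

def pvWitness_iob_to_iobes : List String := ["B-PER", "I-PER", "O", "B-LOC"]

def Spec_iob_to_iobes (tags : List String) (out : List String) : Prop := out = iob_to_iobes_alt tags
instance (tags : List String) (out : List String) : Decidable (Spec_iob_to_iobes tags out) := by unfold Spec_iob_to_iobes; infer_instance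

-- ===== CLAIM (what is proved, stated in full; the proofs are below) =====
def Claim_equal_iob_to_iobes : Prop := ∀ (tags : List String), Dom_iob_to_iobes tags → Pre_iob_to_iobes tags → Spec_iob_to_iobes tags (iob_to_iobes tags)

-- ===== LEMMAS AND PROOFS =====

-- the common reference value: whether the next (following) tag's head is "I"
def nextI : List String → Bool
  | [] => false
  | u :: _ => pvHead u == "I"

def specL : List String → List String
  | [] => []
  | t :: rest => bEmit (nextI rest) t :: specL rest

-- the 'continues' flag in effect after processing (in reverse) everything after xs
def contAfter (c : Bool) (xs : List String) : Bool :=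
  match xs.getLast? with
  | none => c
  | some u => pvHead u == "I"

lemma contAfter_cons (c : Bool) (x : String) (xs : List String) :
    contAfter c (x :: xs) = contAfter (pvHead x == "I") xs := by
  cases xs with
  | nil => simp [contAfter]
  | cons y ys =>
      simp only [contAfter]
      cases h : (y :: ys).getLast? with
      | none => simp at h
      | some u => rw [List.getLast?_cons_cons, h]

lemma altGo_snoc (c : Bool) (xs : List String) (t : String) :
    altGo c (xs ++ [t]) = altGo c xs ++ [bEmit (contAfter c xs) t] := by
  induction xs generalizing c with
  | nil => rfl
  | cons x xs ih =>
      simp only [List.cons_append, altGo, ih, contAfter_cons]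

lemma B_eq_spec (tags : List String) : iob_to_iobes_alt tags = specL tags := by
  induction tags with
  | nil => rfl
  | cons t rest ih =>
      unfold iob_to_iobes_alt at *
      rw [List.reverse_cons, altGo_snoc, List.reverse_append]
      have hc : contAfter false rest.reverse = nextI rest := by
        unfold contAfter
        rw [List.getLast?_reverse]
        cases rest <;> simp [nextI]
      simp [specL, hc, ih]

lemma aStep_eq {rest : List String} (tags : List String) (acc : List String) (k : Nat) (t : String)
    (hd : tags.drop k = t :: rest)
    (ht : t = "O" ∨ pvHead t = "B" ∨ pvHead t = "I") :
    aStep tags acc ((k : Int), t) = acc ++ [bEmit (nextI rest) t] := by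
  have hk : k < tags.length := by
    by_contra h
    rw [List.drop_eq_nil_of_le (by omega)] at hd
    simp at hd
  have hdrop : tags.drop (k + 1) = rest := by
    have := congrArg List.tail hd
    simpa [List.tail_drop] using this
  have hget : tags[k + 1]? = rest.head? := by
    rw [← List.head?_drop, hdrop]
  have hcast : (k : Int) + 1 = ((k + 1 : Nat) : Int) := by push_cast; ring
  have hpy : PySem.List.pyGet? tags ((k : Int) + 1) = rest.head? := by
    rw [hcast, PySem.List.pyGet?_natCast, hget]
  have hlen : ((k : Int) + 1 = (tags.length : Int)) ↔ rest = [] := by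
    constructor
    · intro h
      have : tags.length ≤ k + 1 := by omega
      rw [← hdrop, List.drop_eq_nil_of_le this]
    · intro h
      rw [h] at hdrop
      have := List.drop_eq_nil_iff.mp hdrop
      omega
  by_cases hO : t = "O"
  · simp [aStep, bEmit, hO]
  · by_cases hB : pvHead t = "B"
    · cases rest with
      | nil =>
          have he : (k : Int) + 1 = (tags.length : Int) := hlen.mpr rfl
          simp [aStep, bEmit, nextI, hO, hB, he]
      | cons u us =>
          have hne : ¬ ((k : Int) + 1 = (tags.length : Int)) := fun hh => by simpa using hlen.mp hh
          simp only [aStep, bEmit, nextI, hpy, Option.getD_some, List.head?_cons]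
          by_cases hu : pvHead u = "I" <;> simp [hO, hB, hne, hu]
    · by_cases hI : pvHead t = "I"
      · cases rest with
        | nil =>
            have he : (k : Int) + 1 = (tags.length : Int) := hlen.mpr rfl
            simp [aStep, bEmit, nextI, hO, hI, he]
        | cons u us =>
            have hne : ¬ ((k : Int) + 1 = (tags.length : Int)) := fun hh => by simpa using hlen.mp hh
            have hlt : (k : Int) + 1 < (tags.length : Int) := by
              have : (k : Int) + 1 ≤ (tags.length : Int) := by exact_mod_cast Nat.succ_le_of_lt hk
              omega
            simp only [aStep, bEmit, nextI, hpy, Option.getD_some, List.head?_cons]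
            by_cases hu : pvHead u = "I" <;> simp [hO, hI, hlt, hu]
      · exact absurd ht (by simp [hO, hB, hI])

lemma A_aux (tags : List String) : ∀ (suf : List String) (k : Nat) (acc : List String),
    tags.drop k = suf →
    (∀ t ∈ suf, t = "O" ∨ pvHead t = "B" ∨ pvHead t = "I") →
    (PySem.List.enumerate suf (k : Int)).foldl (aStep tags) acc = acc ++ specL suf := by
  intro suf
  induction suf with
  | nil => intro k acc _ _; simp [PySem.List.enumerate, specL]
  | cons t rest ih =>
      intro k acc hd hpre
      rw [PySem.List.enumerate_cons, List.foldl_cons]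
      rw [aStep_eq tags acc k t hd (hpre t (by simp))]
      have hcast : (k : Int) + 1 = ((k + 1 : Nat) : Int) := by push_cast; ring
      have hdrop : tags.drop (k + 1) = rest := by
        have := congrArg List.tail hd
        simpa [List.tail_drop] using this
      rw [hcast, ih (k + 1) _ hdrop (fun t ht => hpre t (by simp [ht]))]
      simp [specL]

-- ===== VERDICT (by name: the statement is the Claim_ definition above) =====
theorem iob_to_iobes_spec : Claim_equal_iob_to_iobes := by
  intro tags _ hpre
  unfold Spec_iob_to_iobes
  rw [B_eq_spec]
  have h0 : (0 : Int) = ((0 : Nat) : Int) := rfl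
  unfold iob_to_iobes
  rw [h0, A_aux tags tags 0 [] (by simp) hpre]
  simp
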